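-- pv_equiv track=rewrite | github.com/enricotm/WordlePy | Wordle.py | calc_score_dict
-- ===== SOURCE A (Python) =====
-- def calc_score_dict(word, remaining_words):
--     score_dict = {}
--     for y in remaining_words:
--         score = calc_score(word, y)
--         score = ''.join(score)
--         if score not in score_dict:
--             score_dict[score] = [y]
--         else:
--             score_dict[score] += [y]
--     return score_dict
--
-- def calc_score(word, answer):
--     yellow_letters = calc_yellow_and_green(word, answer)
--     score = ['0', '0', '0', '0', '0']  # ['0','0','0','0','0']
--     for a, b, c in zip(word, answer, range(5)):
--         if a == b:
--             score[c] = '2'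
--         elif a in answer and a in yellow_letters:
--             score[c] = '1'
--             yellow_letters.remove(a)
--     return score
--
-- def calc_yellow_and_green(word, answer, need_green=False):
--     green_letters = []
--     yellow_letters = []
--     for a, b in zip(word, answer):
--         if a == b:
--             green_letters.append(a)
--             if green_letters.count(a) + yellow_letters.count(a) > answer.count(a):
--                 yellow_letters.remove(a)
--         elif a in answer:
--             if green_letters.count(a) + yellow_letters.count(a) < answer.count(a):
--                 yellow_letters.append(a)
--     if need_green:
--         return yellow_letters, green_letters
--     else:
--         return yellow_letters
-- ===== SOURCE B (Python) =====
-- def _feedback(word, answer):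
--     # green counts per char over the zipped positions
--     m = min(len(word), len(answer))
--     greens = {}
--     for i in range(m):
--         if word[i] == answer[i]:
--             greens[word[i]] = greens.get(word[i], 0) + 1
--     # yellow budget per char: capped by answer count minus greens
--     budget = {}
--     for i in range(m):
--         c = word[i]
--         if c != answer[i] and c in answer and budget.get(c, 0) < answer.count(c) - greens.get(c, 0):
--             budget[c] = budget.get(c, 0) + 1
--     # emit the score left to right, consuming the budget
--     out = []
--     for i in range(min(m, 5)):
--         c = word[i]
--         if c == answer[i]:
--             out.append('2')
--         elif budget.get(c, 0) > 0:
--             out.append('1')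
--             budget[c] = budget[c] - 1
--         else:
--             out.append('0')
--     return ''.join(out) + '0' * (5 - len(out))
--
-- def calc_score_dict(word, remaining_words):
--     score_dict = {}
--     for y in remaining_words:
--         s = _feedback(word, y)
--         score_dict.setdefault(s, []).append(y)
--     return score_dict
-- ===== Notes on version B (the rewrite author's own statement) =====
-- stated objective: simpler
-- what changed: Replaced A's feedback helper, which builds a mutable yellow-letter list with retroactive .remove/.count bookkeeping and then consumes it by membership-test-and-remove, with the standard two-pass Wordle scoring: count greens per letter, derive a capped per-letter yellow budget dict, then emit the 5-char score left to right decrementing the budget; grouping uses dict.setdefault.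
import Mathlib
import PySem

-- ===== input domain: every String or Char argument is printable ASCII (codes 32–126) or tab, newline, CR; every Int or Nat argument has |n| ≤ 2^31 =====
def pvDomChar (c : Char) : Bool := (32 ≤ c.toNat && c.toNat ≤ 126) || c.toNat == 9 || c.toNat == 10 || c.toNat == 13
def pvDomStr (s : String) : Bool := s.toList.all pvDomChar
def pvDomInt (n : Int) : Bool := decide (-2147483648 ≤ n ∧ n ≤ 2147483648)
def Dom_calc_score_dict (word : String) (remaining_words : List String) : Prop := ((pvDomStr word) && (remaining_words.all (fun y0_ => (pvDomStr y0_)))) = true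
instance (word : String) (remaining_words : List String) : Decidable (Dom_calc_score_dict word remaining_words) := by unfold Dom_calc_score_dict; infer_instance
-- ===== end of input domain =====

-- B replaces A's mutable yellow-letter list bookkeeping by precomputed per-letter green counts and
-- a capped yellow budget (two counting passes), then emits the score left to right; objective: simpler.

-- ===== PORT A =====
def pyCygStep (ans : List Char) (st : List Char × List Char) (ab : Char × Char) :
    List Char × List Char :=
  if ab.1 = ab.2 then
    if ans.count ab.1 < (st.1 ++ [ab.1]).count ab.1 + st.2.count ab.1 then
      (st.1 ++ [ab.1], (PySem.List.remove? st.2 ab.1).getD st.2)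
    else (st.1 ++ [ab.1], st.2)
  else if ab.1 ∈ ans then
    if st.1.count ab.1 + st.2.count ab.1 < ans.count ab.1 then (st.1, st.2 ++ [ab.1])
    else st
  else st

def calc_yellow_and_green (word answer : String) : List Char :=
  ((word.toList.zip answer.toList).foldl (pyCygStep answer.toList) ([], [])).2

def pyScoreStep (ans : List Char) (st : List Char × List Char) (x : (Char × Char) × Nat) :
    List Char × List Char :=
  if x.1.1 = x.1.2 then (st.1.set x.2 '2', st.2)
  else if x.1.1 ∈ ans ∧ x.1.1 ∈ st.2 then
    (st.1.set x.2 '1', (PySem.List.remove? st.2 x.1.1).getD st.2)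
  else st

def calc_score (word answer : String) : List Char :=
  (((word.toList.zip answer.toList).zip (List.range 5)).foldl (pyScoreStep answer.toList)
    (['0', '0', '0', '0', '0'], calc_yellow_and_green word answer)).1

def calc_score_dict (word : String) (remaining_words : List String) : List (String × List String) :=
  (remaining_words.foldl (fun d y =>
      let score := String.mk (calc_score word y)
      if d.contains score = false then d.insert score [y]
      else d.insert score (d.getD score [] ++ [y]))
    (PySem.Dict.empty : PySem.Dict String (List String))).items

-- ===== PORT B =====
def altGreens (w ans : List Char) : PySem.Dict Char Int :=
  (w.zip ans).foldl
    (fun d ab => if ab.1 = ab.2 then d.insert ab.1 (d.getD ab.1 0 + 1) else d)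
    PySem.Dict.empty

def altBudget (w ans : List Char) : PySem.Dict Char Int :=
  let greens := altGreens w ans
  (w.zip ans).foldl
    (fun d ab =>
      if ab.1 ≠ ab.2 ∧ ab.1 ∈ ans ∧ d.getD ab.1 0 < (ans.count ab.1 : Int) - greens.getD ab.1 0
      then d.insert ab.1 (d.getD ab.1 0 + 1) else d)
    PySem.Dict.empty

def altEmitStep (st : List Char × PySem.Dict Char Int) (ab : Char × Char) :
    List Char × PySem.Dict Char Int :=
  if ab.1 = ab.2 then (st.1 ++ ['2'], st.2)
  else if 0 < st.2.getD ab.1 0 then (st.1 ++ ['1'], st.2.insert ab.1 (st.2.getD ab.1 0 - 1))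
  else (st.1 ++ ['0'], st.2)

def pyFeedbackAlt (word answer : String) : List Char :=
  let pairs := word.toList.zip answer.toList
  let out := ((pairs.take 5).foldl altEmitStep ([], altBudget word.toList answer.toList)).1
  out ++ List.replicate (5 - (pairs.take 5).length) '0'

def calc_score_dict_alt (word : String) (remaining_words : List String) :
    List (String × List String) :=
  (remaining_words.foldl (fun d y =>
      let s := String.mk (pyFeedbackAlt word y)
      d.insert s (d.getD s [] ++ [y]))
    (PySem.Dict.empty : PySem.Dict String (List String))).items

-- ===== PRECONDITION & SPEC =====
def Spec_calc_score_dict (word : String) (remaining_words : List String) (out : List (String × List String)) : Prop := out = calc_score_dict_alt word remaining_words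
instance (word : String) (remaining_words : List String) (out : List (String × List String)) : Decidable (Spec_calc_score_dict word remaining_words out) := by unfold Spec_calc_score_dict; infer_instance

-- ===== CLAIM (what is proved, stated in full; the proofs are below) =====
def Claim_equal_calc_score_dict : Prop := ∀ (word : String) (remaining_words : List String), Dom_calc_score_dict word remaining_words → Spec_calc_score_dict word remaining_words (calc_score_dict word remaining_words)

-- ===== LEMMAS AND PROOFS =====

-- per-letter counts over a list of (word-char, answer-char) pairs
def gCt (c : Char) (ps : List (Char × Char)) : Nat :=
  ps.countP (fun ab => ab.1 == ab.2 && ab.1 == c)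

def rCt (c : Char) (ps : List (Char × Char)) : Nat :=
  ps.countP (fun ab => !(ab.1 == ab.2) && ab.1 == c)

-- yellow candidates actually retained for letter c (0 when c is not in the answer)
def yB (ans : List Char) (c : Char) (ps : List (Char × Char)) : Nat :=
  if c ∈ ans then rCt c ps else 0

-- the emitted score, recursively, consuming an Int budget dict
def emitSpec (ps : List (Char × Char)) (bud : PySem.Dict Char Int) : List Char :=
  match ps with
  | [] => []
  | ab :: tl =>
    if ab.1 = ab.2 then '2' :: emitSpec tl bud
    else if 0 < bud.getD ab.1 0 then
      '1' :: emitSpec tl (bud.insert ab.1 (bud.getD ab.1 0 - 1))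
    else '0' :: emitSpec tl bud

lemma zip_range' (l : List (Char × Char)) : ∀ (n k : Nat),
    l.zip (List.range' k n) = (l.take n).zip (List.range' k (l.take n).length) := by
  induction l with
  | nil => simp
  | cons x tl ih =>
    intro n k
    cases n with
    | zero => simp
    | succ m => simp [List.range'_succ, ih m (k+1)]

lemma altEmit_fold (ps : List (Char × Char)) :
    ∀ (o : List Char) (bud : PySem.Dict Char Int),
      (ps.foldl altEmitStep (o, bud)).1 = o ++ emitSpec ps bud := by
  induction ps with
  | nil => simp [emitSpec]
  | cons ab tl ih =>
    intro o bud
    by_cases h : ab.1 = ab.2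
    · simp [altEmitStep, emitSpec, h, ih]
    · by_cases h2 : 0 < bud.getD ab.1 0
      · simp [altEmitStep, emitSpec, h, h2, ih]
      · simp [altEmitStep, emitSpec, h, h2, ih]

lemma gCt_le (w ans : List Char) (c : Char) : gCt c (w.zip ans) ≤ ans.count c := by
  induction w generalizing ans with
  | nil => simp [gCt]
  | cons a tw ih =>
    cases ans with
    | nil => simp [gCt]
    | cons b ta =>
      simp only [List.zip_cons_cons, gCt, List.countP_cons, List.count_cons]
      have := ih ta
      simp only [gCt] at this
      by_cases hab : a = b <;> by_cases hc : b = c <;> simp_all <;> omega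

lemma sndCount_le (w ans : List Char) (c : Char) :
    ((w.zip ans).map Prod.snd).count c ≤ ans.count c := by
  induction w generalizing ans with
  | nil => simp
  | cons a tw ih =>
    cases ans with
    | nil => simp
    | cons b ta =>
      simp only [List.zip_cons_cons, List.map_cons, List.count_cons]
      have := ih ta
      by_cases hc : b = c <;> simp [hc] <;> omega

lemma greens_fold (ps : List (Char × Char)) :
    ∀ (d : PySem.Dict Char Int) (c : Char),
      (ps.foldl
        (fun d ab => if ab.1 = ab.2 then d.insert ab.1 (d.getD ab.1 0 + 1) else d) d).getD c 0
      = d.getD c 0 + (gCt c ps : Int) := by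
  induction ps with
  | nil => simp [gCt]
  | cons ab tl ih =>
    intro d c
    by_cases hab : ab.1 = ab.2
    · simp only [List.foldl_cons, if_pos hab, ih, gCt, List.countP_cons]
      rw [PySem.Dict.getD_insert]
      by_cases hc : c = ab.1
      · subst hc
        simp [hab, gCt]
        push_cast
        omega
      · simp [hc, Ne.symm hc, gCt]
    · simp only [List.foldl_cons, if_neg hab, ih, gCt, List.countP_cons]
      simp [hab]

lemma altGreens_getD (w ans : List Char) (c : Char) :
    (altGreens w ans).getD c 0 = (gCt c (w.zip ans) : Int) := by
  unfold altGreens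
  rw [greens_fold]
  simp

lemma budget_fold (w ans : List Char) (ps : List (Char × Char)) :
    ∀ (d : PySem.Dict Char Int) (R : Char → Nat),
      (∀ c, d.getD c 0 = ((min (R c) (ans.count c - gCt c (w.zip ans)) : Nat) : Int)) →
      ∀ c,
        (ps.foldl
          (fun d ab =>
            if ab.1 ≠ ab.2 ∧ ab.1 ∈ ans ∧
                d.getD ab.1 0 < (ans.count ab.1 : Int) - (altGreens w ans).getD ab.1 0
            then d.insert ab.1 (d.getD ab.1 0 + 1) else d) d).getD c 0
        = ((min (R c + yB ans c ps) (ans.count c - gCt c (w.zip ans)) : Nat) : Int) := by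
  induction ps with
  | nil => intro d R hd c; simp [yB, rCt, hd c]
  | cons ab tl ih =>
    intro d R hd c
    have hgle := gCt_le w ans ab.1
    have hcap : (ans.count ab.1 : Int) - (altGreens w ans).getD ab.1 0
        = ((ans.count ab.1 - gCt ab.1 (w.zip ans) : Nat) : Int) := by
      rw [altGreens_getD]; push_cast [hgle]; ring
    by_cases hcond : ab.1 ≠ ab.2 ∧ ab.1 ∈ ans ∧
        d.getD ab.1 0 < (ans.count ab.1 : Int) - (altGreens w ans).getD ab.1 0
    · have hlt := hcond.2.2
      rw [hcap, hd ab.1] at hlt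
      have hRlt : R ab.1 < ans.count ab.1 - gCt ab.1 (w.zip ans) := by
        have h2 : min (R ab.1) (ans.count ab.1 - gCt ab.1 (w.zip ans))
            < ans.count ab.1 - gCt ab.1 (w.zip ans) := by exact_mod_cast hlt
        omega
      simp only [List.foldl_cons, if_pos hcond]
      rw [ih _ (fun c => if c = ab.1 then R ab.1 + 1 else R c) ?_ c]
      · by_cases hc : c = ab.1
        · simp only [hc, if_pos rfl, yB, if_pos hcond.2.1, rCt, List.countP_cons]
          have h1 : (!(ab.1 == ab.2) && ab.1 == ab.1) = true := by simp [hcond.1]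
          simp only [h1, if_pos rfl]
          push_cast
          omega
        · simp only [if_neg hc, yB, rCt, List.countP_cons]
          have h1 : (ab.1 == c) = false := by simp [Ne.symm hc]
          simp [h1]
      · intro c'
        rw [PySem.Dict.getD_insert]
        by_cases hc' : c' = ab.1
        · simp only [hc', if_pos rfl, hd ab.1]
          push_cast
          omega
        · simp only [if_neg hc', hd c']
    · simp only [List.foldl_cons, if_neg hcond]
      rw [ih d R hd c]
      by_cases hc : c = ab.1
      · by_cases hne : ab.1 ≠ ab.2
        · by_cases hmem : ab.1 ∈ ans
          · have hge : ¬ (d.getD ab.1 0 < (ans.count ab.1 : Int) - (altGreens w ans).getD ab.1 0) := by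
              intro hlt; exact hcond ⟨hne, hmem, hlt⟩
            rw [hcap, hd ab.1] at hge
            have hR : ans.count ab.1 - gCt ab.1 (w.zip ans) ≤ R ab.1 := by
              have h2 : ((ans.count ab.1 - gCt ab.1 (w.zip ans) : Nat) : Int)
                  ≤ ((min (R ab.1) (ans.count ab.1 - gCt ab.1 (w.zip ans)) : Nat) : Int) :=
                not_lt.mp hge
              have h3 : ans.count ab.1 - gCt ab.1 (w.zip ans)
                  ≤ min (R ab.1) (ans.count ab.1 - gCt ab.1 (w.zip ans)) := by exact_mod_cast h2
              omega
            simp only [hc, yB, if_pos hmem, rCt, List.countP_cons]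
            have h1 : (!(ab.1 == ab.2) && ab.1 == ab.1) = true := by simp [hne]
            simp only [h1, if_pos rfl]
            push_cast
            omega
          · simp [hc, yB, hmem]
        · push_neg at hne
          simp only [hc, yB, rCt, List.countP_cons]
          have h1 : (!(ab.1 == ab.2)) = false := by simp [hne]
          simp [h1]
      · simp only [yB, rCt, List.countP_cons]
        have h1 : (ab.1 == c) = false := by simp [Ne.symm hc]
        simp [h1]

lemma altBudget_getD (w ans : List Char) (c : Char) :
    (altBudget w ans).getD c 0
      = ((min (yB ans c (w.zip ans)) (ans.count c - gCt c (w.zip ans)) : Nat) : Int) := by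
  unfold altBudget
  rw [budget_fold w ans (w.zip ans) PySem.Dict.empty (fun _ => 0) (by intro c; simp)]
  simp

lemma cyg_fold (ans : List Char) :
    ∀ (ps : List (Char × Char)) (gs ys : List Char) (R : Char → Nat),
      (∀ c, gs.count c + (ps.map Prod.snd).count c ≤ ans.count c) →
      (∀ c, ys.count c = min (R c) (ans.count c - gs.count c)) →
      (∀ c, (ps.foldl (pyCygStep ans) (gs, ys)).1.count c = gs.count c + gCt c ps) ∧
      (∀ c, (ps.foldl (pyCygStep ans) (gs, ys)).2.count c
            = min (R c + yB ans c ps) (ans.count c - (gs.count c + gCt c ps))) := by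
  intro ps
  induction ps with
  | nil =>
    intro gs ys R hb hy
    refine ⟨fun c => by simp [gCt], fun c => by simpa [gCt, yB, rCt] using hy c⟩
  | cons ab tl ih =>
    intro gs ys R hb hy
    have hbtl : ∀ c, gs.count c + ((ab :: tl).map Prod.snd).count c ≤ ans.count c := hb
    by_cases hab : ab.1 = ab.2
    · -- green position
      have ha1 : gs.count ab.1 + 1 ≤ ans.count ab.1 := by
        have := hb ab.1
        simp only [List.map_cons, List.count_cons] at this
        have hbb : (ab.2 == ab.1) = true := by simp [hab]
        simp [hbb] at this
        omega
      have hgs' : ∀ c, (gs ++ [ab.1]).count c = gs.count c + (if ab.1 = c then 1 else 0) := by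
        intro c
        simp [List.count_append, List.count_singleton]
      have hbnew : ∀ c, (gs ++ [ab.1]).count c + (tl.map Prod.snd).count c ≤ ans.count c := by
        intro c
        have := hb c
        simp only [List.map_cons, List.count_cons] at this
        rw [hgs']
        by_cases h : ab.1 = c
        · have : gs.count c + ((tl.map Prod.snd).count c + if ab.2 == c then 1 else 0)
              ≤ ans.count c := this
          have hbc : (ab.2 == c) = true := by simp [← hab, h]
          simp [hbc] at this
          simp [h]
          omega
        · simp [h]
          have hbc : (ab.2 == c) = (decide (ab.2 = c)) := rfl
          by_cases h2 : ab.2 = c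
          · simp [h2] at this; omega
          · simp [h2] at this; omega
      by_cases hrem : ans.count ab.1 < (gs ++ [ab.1]).count ab.1 + ys.count ab.1
      · -- retroactive removal
        have hys1 : ys.count ab.1 = ans.count ab.1 - gs.count ab.1 := by
          have := hy ab.1
          rw [hgs' ab.1] at hrem
          simp at hrem
          omega
        have hpos : 0 < ys.count ab.1 := by
          rw [hgs' ab.1] at hrem; simp at hrem; omega
        have hmem : ab.1 ∈ ys := List.count_pos_iff.mp hpos
        have hrm : (PySem.List.remove? ys ab.1).getD ys = ys.erase ab.1 := by
          rw [PySem.List.remove?_eq_some_erase ys ab.1 hmem]; rfl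
        have hRge : ans.count ab.1 - gs.count ab.1 ≤ R ab.1 := by
          have := hy ab.1; omega
        simp only [List.foldl_cons, pyCygStep, if_pos hab, if_pos hrem, hrm]
        have hy' : ∀ c, (ys.erase ab.1).count c
            = min (R c) (ans.count c - (gs ++ [ab.1]).count c) := by
          intro c
          by_cases hc : c = ab.1
          · subst hc
            rw [List.count_erase_self, hgs']
            simp
            omega
          · rw [List.count_erase_of_ne hc, hgs', hy c]
            have : ¬ (ab.1 = c) := fun h => hc h.symm
            simp [this]
        obtain ⟨ih1, ih2⟩ := ih (gs ++ [ab.1]) (ys.erase ab.1) R hbnew hy'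
        constructor
        · intro c
          rw [ih1 c, hgs' c]
          simp only [gCt, List.countP_cons]
          have hcc : (ab.1 == ab.2 && ab.1 == c) = (decide (ab.1 = c)) := by
            simp [hab, Bool.beq_eq_decide_eq]
          rw [hcc]
          by_cases h : ab.1 = c <;> simp [h] <;> omega
        · intro c
          rw [ih2 c, hgs' c]
          simp only [gCt, yB, rCt, List.countP_cons]
          have h2 : (!(ab.1 == ab.2) && ab.1 == c) = false := by simp [hab]
          have hcc : (ab.1 == ab.2 && ab.1 == c) = (decide (ab.1 = c)) := by simp [hab, Bool.beq_eq_decide_eq]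
          rw [h2, hcc]
          by_cases h : ab.1 = c <;> simp [h] <;> omega
      · -- no removal
        simp only [List.foldl_cons, pyCygStep, if_pos hab, if_neg hrem]
        have hy' : ∀ c, ys.count c = min (R c) (ans.count c - (gs ++ [ab.1]).count c) := by
          intro c
          by_cases hc : c = ab.1
          · subst hc
            rw [hgs']
            have h1 := hy ab.1
            rw [hgs' ab.1] at hrem
            simp at hrem ⊢
            omega
          · rw [hgs', hy c]
            have : ¬ (ab.1 = c) := fun h => hc h.symm
            simp [this]
        obtain ⟨ih1, ih2⟩ := ih (gs ++ [ab.1]) ys R hbnew hy'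
        constructor
        · intro c
          rw [ih1 c, hgs' c]
          simp only [gCt, List.countP_cons]
          have hcc : (ab.1 == ab.2 && ab.1 == c) = (decide (ab.1 = c)) := by simp [hab, Bool.beq_eq_decide_eq]
          rw [hcc]
          by_cases h : ab.1 = c <;> simp [h] <;> omega
        · intro c
          rw [ih2 c, hgs' c]
          simp only [gCt, yB, rCt, List.countP_cons]
          have h2 : (!(ab.1 == ab.2) && ab.1 == c) = false := by simp [hab]
          have hcc : (ab.1 == ab.2 && ab.1 == c) = (decide (ab.1 = c)) := by simp [hab, Bool.beq_eq_decide_eq]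
          rw [h2, hcc]
          by_cases h : ab.1 = c <;> simp [h] <;> omega
    · -- not green
      have hbtl' : ∀ c, gs.count c + (tl.map Prod.snd).count c ≤ ans.count c := by
        intro c
        have := hb c
        simp only [List.map_cons, List.count_cons] at this
        by_cases h : ab.2 = c
        · simp [h] at this; omega
        · simp [h] at this; omega
      by_cases hin : ab.1 ∈ ans
      · by_cases happ : gs.count ab.1 + ys.count ab.1 < ans.count ab.1
        · -- append a yellow
          have hRlt : R ab.1 < ans.count ab.1 - gs.count ab.1 := by
            have := hy ab.1; omega
          simp only [List.foldl_cons, pyCygStep, if_neg hab, if_pos hin, if_pos happ]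
          have hys' : ∀ c, (ys ++ [ab.1]).count c
              = min ((fun c => if c = ab.1 then R ab.1 + 1 else R c) c)
                  (ans.count c - gs.count c) := by
            intro c
            simp only [List.count_append, List.count_singleton]
            by_cases hc : c = ab.1
            · subst hc
              simp only [if_pos rfl]
              have := hy ab.1
              simp
              omega
            · have : (c == ab.1) = false := by simp [hc]
              simp [this, hc, hy c]
              exact fun h => hc h.symm
          obtain ⟨ih1, ih2⟩ := ih gs (ys ++ [ab.1]) _ hbtl' hys'
          constructor
          · intro c
            rw [ih1 c]
            simp only [gCt, List.countP_cons]
            have hcc : (ab.1 == ab.2 && ab.1 == c) = false := by simp [hab]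
            simp [hcc]
          · intro c
            rw [ih2 c]
            simp only [gCt, yB, rCt, List.countP_cons]
            have h2 : (ab.1 == ab.2 && ab.1 == c) = false := by simp [hab]
            rw [h2]
            by_cases hc : c = ab.1
            · subst hc
              have h3 : (!(ab.1 == ab.2) && ab.1 == ab.1) = true := by simp [hab]
              simp only [h3, if_pos rfl, if_pos hin]
              simp
              omega
            · have h3 : (!(ab.1 == ab.2) && ab.1 == c) = false := by
                simp [Ne.symm hc]
              simp only [h3, if_neg hc]
              simp
          -- done append case
        · -- budget already full for ab.1
          have hRge : ans.count ab.1 - gs.count ab.1 ≤ R ab.1 := by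
            have := hy ab.1; omega
          simp only [List.foldl_cons, pyCygStep, if_neg hab, if_pos hin, if_neg happ]
          obtain ⟨ih1, ih2⟩ := ih gs ys R hbtl' hy
          constructor
          · intro c
            rw [ih1 c]
            simp only [gCt, List.countP_cons]
            have hcc : (ab.1 == ab.2 && ab.1 == c) = false := by simp [hab]
            simp [hcc]
          · intro c
            rw [ih2 c]
            simp only [gCt, yB, rCt, List.countP_cons]
            have h2 : (ab.1 == ab.2 && ab.1 == c) = false := by simp [hab]
            rw [h2]
            by_cases hc : c = ab.1
            · subst hc
              have h3 : (!(ab.1 == ab.2) && ab.1 == ab.1) = true := by simp [hab]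
              simp only [h3, if_pos hin]
              have hgmon : gCt ab.1 tl ≤ (tl.map Prod.snd).count ab.1 := by
                simp only [gCt, List.count_eq_countP, List.countP_map]
                apply List.countP_mono_left
                intro x hx h
                simp only [Function.comp] at *
                have h1 : x.1 = x.2 := by
                  have := (Bool.and_eq_true _ _).mp h
                  exact beq_iff_eq.mp this.1
                have h2 : x.1 = ab.1 := by
                  have := (Bool.and_eq_true _ _).mp h
                  exact beq_iff_eq.mp this.2
                simp [← h1, h2]
              have hbc := hbtl' ab.1
              simp
              omega
            · have h3 : (!(ab.1 == ab.2) && ab.1 == c) = false := by simp [Ne.symm hc]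
              simp [h3]
      · -- letter not in answer
        simp only [List.foldl_cons, pyCygStep, if_neg hab, if_neg hin]
        obtain ⟨ih1, ih2⟩ := ih gs ys R hbtl' hy
        constructor
        · intro c
          rw [ih1 c]
          simp only [gCt, List.countP_cons]
          have hcc : (ab.1 == ab.2 && ab.1 == c) = false := by simp [hab]
          simp [hcc]
        · intro c
          rw [ih2 c]
          simp only [gCt, yB, rCt, List.countP_cons]
          have h2 : (ab.1 == ab.2 && ab.1 == c) = false := by simp [hab]
          rw [h2]
          by_cases hc : c = ab.1
          · subst hc
            simp [hin]
          · have h3 : (!(ab.1 == ab.2) && ab.1 == c) = false := by simp [Ne.symm hc]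
            simp [h3]

lemma take_set_succ (l : List Char) (k : Nat) (ch : Char) (h : k < l.length) :
    (l.set k ch).take (k + 1) = l.take k ++ [ch] := by
  rw [List.set_eq_take_append_cons_drop, if_pos h]
  rw [List.take_append]
  have hm : min k l.length = k := by omega
  simp [List.take_take, hm, show k + 1 - k = 1 from by omega]

lemma take_succ_zero (l : List Char) (k : Nat) (hk : k < 5)
    (h5 : l.drop k = List.replicate (5 - k) '0') :
    l.take (k + 1) = l.take k ++ ['0'] := by
  rw [List.take_add_one]
  have h0 : l[k]? = some '0' := by
    have : l[k]? = (l.drop k)[0]? := by rw [List.getElem?_drop]; simp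
    rw [this, h5]
    have : 0 < 5 - k := by omega
    simp [List.getElem?_replicate, this]
  simp [h0]

lemma score_fold (ans : List Char) :
    ∀ (ps : List (Char × Char)) (k : Nat) (score ys : List Char) (bud : PySem.Dict Char Int),
      score.length = 5 → k + ps.length ≤ 5 →
      score.drop k = List.replicate (5 - k) '0' →
      (∀ c, (ys.count c : Int) = bud.getD c 0) →
      (∀ c, 0 < bud.getD c 0 → c ∈ ans) →
      ((ps.zip (List.range' k ps.length)).foldl (pyScoreStep ans) (score, ys)).1
        = score.take k ++ emitSpec ps bud ++ List.replicate (5 - (k + ps.length)) '0' := by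
  intro ps
  induction ps with
  | nil =>
    intro k score ys bud hlen hk hdrop hrel hmem
    simp [emitSpec]
    rw [← hdrop]
    exact (List.take_append_drop k score).symm
  | cons ab tl ih =>
    intro k score ys bud hlen hk hdrop hrel hmem
    have hk5 : k < 5 := by simp at hk; omega
    have hkl : k < score.length := by omega
    simp only [List.length_cons, List.range'_succ, List.zip_cons_cons, List.foldl_cons]
    by_cases hab : ab.1 = ab.2
    · -- green
      have hstep : pyScoreStep ans (score, ys) (ab, k) = (score.set k '2', ys) := by
        simp [pyScoreStep, hab]
      rw [hstep]
      have hlen' : (score.set k '2').length = 5 := by simp [hlen]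
      have hdrop' : (score.set k '2').drop (k + 1) = List.replicate (5 - (k + 1)) '0' := by
        rw [List.drop_set, if_pos (by omega)]
        rw [← List.drop_drop, hdrop]
        rw [List.drop_replicate]
        congr 1
      rw [ih (k + 1) (score.set k '2') ys bud hlen' (by simp at hk ⊢; omega) hdrop' hrel hmem]
      rw [take_set_succ _ _ _ hkl]
      simp only [emitSpec, if_pos hab]
      have h9 : 5 - (k + 1 + tl.length) = 5 - (k + (tl.length + 1)) := by omega
      rw [h9]
      simp [List.append_assoc]
    · -- not green
      by_cases hbud : 0 < bud.getD ab.1 0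
      · -- yellow
        have hysmem : ab.1 ∈ ys := by
          have := hrel ab.1
          apply List.count_pos_iff.mp
          omega
        have hguard : ab.1 ∈ ans ∧ ab.1 ∈ ys := ⟨hmem ab.1 hbud, hysmem⟩
        have hrm : (PySem.List.remove? ys ab.1).getD ys = ys.erase ab.1 := by
          rw [PySem.List.remove?_eq_some_erase ys ab.1 hysmem]; rfl
        have hstep : pyScoreStep ans (score, ys) (ab, k) = (score.set k '1', ys.erase ab.1) := by
          simp only [pyScoreStep]
          rw [if_neg hab, if_pos hguard, hrm]
        rw [hstep]
        have hlen' : (score.set k '1').length = 5 := by simp [hlen]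
        have hdrop' : (score.set k '1').drop (k + 1) = List.replicate (5 - (k + 1)) '0' := by
          rw [List.drop_set, if_pos (by omega)]
          rw [← List.drop_drop, hdrop, List.drop_replicate]
          congr 1
        have hrel' : ∀ c, ((ys.erase ab.1).count c : Int)
            = (bud.insert ab.1 (bud.getD ab.1 0 - 1)).getD c 0 := by
          intro c
          rw [PySem.Dict.getD_insert]
          by_cases hc : c = ab.1
          · subst hc
            rw [if_pos rfl, List.count_erase_self, ← hrel ab.1]
            have : 0 < ys.count ab.1 := by have := hrel ab.1; omega
            push_cast
            omega
          · rw [if_neg hc, List.count_erase_of_ne hc, hrel c]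
        have hmem' : ∀ c, 0 < (bud.insert ab.1 (bud.getD ab.1 0 - 1)).getD c 0 → c ∈ ans := by
          intro c
          rw [PySem.Dict.getD_insert]
          by_cases hc : c = ab.1
          · subst hc
            intro _
            exact hmem ab.1 hbud
          · rw [if_neg hc]
            exact hmem c
        rw [ih (k + 1) (score.set k '1') (ys.erase ab.1) _ hlen' (by simp at hk ⊢; omega)
            hdrop' hrel' hmem']
        rw [take_set_succ _ _ _ hkl]
        simp only [emitSpec, if_neg hab, if_pos hbud]
        have h9 : 5 - (k + 1 + tl.length) = 5 - (k + (tl.length + 1)) := by omega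
        rw [h9]
        simp [List.append_assoc]
      · -- gray
        have hnot : ¬ (ab.1 ∈ ans ∧ ab.1 ∈ ys) := by
          intro ⟨_, h2⟩
          have := hrel ab.1
          have := List.count_pos_iff.mpr h2
          omega
        have hstep : pyScoreStep ans (score, ys) (ab, k) = (score, ys) := by
          simp only [pyScoreStep]
          rw [if_neg hab, if_neg hnot]
        rw [hstep]
        have hdrop' : score.drop (k + 1) = List.replicate (5 - (k + 1)) '0' := by
          rw [← List.drop_drop, hdrop, List.drop_replicate]
          congr 1
        rw [ih (k + 1) score ys bud hlen (by simp at hk ⊢; omega) hdrop' hrel hmem]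
        rw [take_succ_zero score k hk5 hdrop]
        simp only [emitSpec, if_neg hab, if_neg hbud]
        have h9 : 5 - (k + 1 + tl.length) = 5 - (k + (tl.length + 1)) := by omega
        rw [h9]
        simp [List.append_assoc]

-- the per-word feedback of the two ports agrees
lemma feedback_eq (word answer : String) :
    calc_score word answer = pyFeedbackAlt word answer := by
  have hzip : (word.toList.zip answer.toList).zip (List.range 5)
      = ((word.toList.zip answer.toList).take 5).zip
          (List.range' 0 ((word.toList.zip answer.toList).take 5).length) := by
    rw [List.range_eq_range']
    exact zip_range' _ 5 0
  have hcyg := cyg_fold answer.toList (word.toList.zip answer.toList) [] [] (fun _ => 0)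
    (by intro c; simpa using sndCount_le word.toList answer.toList c)
    (by intro c; simp)
  have hrel : ∀ c, ((calc_yellow_and_green word answer).count c : Int)
      = (altBudget word.toList answer.toList).getD c 0 := by
    intro c
    have h1 := hcyg.2 c
    simp only [calc_yellow_and_green]
    rw [h1, altBudget_getD]
    simp
  have hmem : ∀ c, 0 < (altBudget word.toList answer.toList).getD c 0 → c ∈ answer.toList := by
    intro c h
    rw [altBudget_getD] at h
    by_contra hn
    simp [yB, hn] at h
  unfold calc_score pyFeedbackAlt
  rw [hzip]
  rw [score_fold answer.toList ((word.toList.zip answer.toList).take 5) 0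
      ['0', '0', '0', '0', '0'] (calc_yellow_and_green word answer)
      (altBudget word.toList answer.toList) rfl
      (by simpa using List.length_take_le 5 (word.toList.zip answer.toList))
      (by rfl) hrel hmem]
  simp [altEmit_fold]

-- ===== VERDICT (by name: the statement is the Claim_ definition above) =====
theorem calc_score_dict_spec : Claim_equal_calc_score_dict := by
  intro word remaining_words _
  unfold Spec_calc_score_dict calc_score_dict calc_score_dict_alt
  congr 1
  apply PySem.List.foldl_congr_mem
  intro d y _
  simp only [feedback_eq word y]
  by_cases h : d.contains (String.mk (pyFeedbackAlt word y)) = false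
  · rw [if_pos h, PySem.Dict.getD_of_not_contains d [] h]
    simp
  · rw [if_neg h]
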